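-- pv_equiv track=rewrite | github.com/eve-spyglass/spyglass | src/vi/dotlan.py | convertRegionName
-- ===== SOURCE A (Python) =====
-- def convertRegionName(name):
--     """
--         Converts a (system)name to the format that dotland uses
--     """
--     converted = []
--     nextUpper = False
--
--     for index, char in enumerate(name):
--         if index == 0:
--             converted.append(char.upper())
--         else:
--             if char in (u" ", u"_"):
--                 char = "_"
--                 nextUpper = True
--             else:
--                 if nextUpper:
--                     char = char.upper()
--                 else:
--                     char = char.lower()
--                 nextUpper = False
--             converted.append(char)
--     return u"".join(converted)
-- ===== SOURCE B (Python) =====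
-- import re
--
--
-- def convertRegionName(name):
--     """
--         Converts a (system)name to the format that dotland uses
--     """
--     if not name:
--         return u""
--     rest = u"".join(u"_" if c in (u" ", u"_") else c.lower() for c in name[1:])
--     rest = re.sub(r"(?<=_).", lambda m: m.group(0).upper(), rest)
--     return name[0].upper() + rest
-- ===== Notes on version B (the rewrite author's own statement) =====
-- stated objective: idiomatic
-- what changed: Replaces the index/flag character loop with a per-character separator/lowercase mapping followed by a regex substitution (with an underscore lookbehind) that uppercases each character after an underscore, with the first character handled separately.
import Mathlib
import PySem

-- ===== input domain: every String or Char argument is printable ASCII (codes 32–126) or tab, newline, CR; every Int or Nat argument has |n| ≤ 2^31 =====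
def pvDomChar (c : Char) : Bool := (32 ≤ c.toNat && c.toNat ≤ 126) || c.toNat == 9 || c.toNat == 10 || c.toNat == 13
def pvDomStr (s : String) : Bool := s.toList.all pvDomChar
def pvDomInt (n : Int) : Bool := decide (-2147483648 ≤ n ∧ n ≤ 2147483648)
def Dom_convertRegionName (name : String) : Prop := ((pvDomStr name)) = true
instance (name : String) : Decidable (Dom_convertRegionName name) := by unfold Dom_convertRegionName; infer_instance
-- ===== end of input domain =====

-- B replaces A's index/flag loop by a lowercase/separator map plus a regex-style second pass (idiomatic; same O(n)).

-- ===== PORT A =====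
-- the for-loop over enumerate(name), with the accumulator (converted, nextUpper)
def pvAGo : List (Int × Char) → List Char → Bool → List Char
  | [], conv, _ => conv
  | (i, ch) :: rest, conv, u =>
    if i = 0 then pvAGo rest (conv ++ [PySem.Chars.upperChar ch]) u
    else if ch = ' ' ∨ ch = '_' then pvAGo rest (conv ++ ['_']) true
    else if u then pvAGo rest (conv ++ [PySem.Chars.upperChar ch]) false
    else pvAGo rest (conv ++ [PySem.Chars.lowerChar ch]) false

def convertRegionName (name : String) : String :=
  String.ofList (pvAGo (PySem.List.enumerate name.toList) [] false)

-- ===== PORT B =====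
-- the generator expression: ' '/'_' -> '_', otherwise c.lower()
def pvBMap (c : Char) : Char :=
  if c = ' ' ∨ c = '_' then '_' else PySem.Chars.lowerChar c

-- the re.sub call with the underscore-lookbehind dot pattern, hand-ported exactly: a character is
-- uppercased iff the previous character is '_' and it is not '\n' ('.' never matches '\n')
def pvRegexAux : Char → List Char → List Char
  | _, [] => []
  | prev, c :: cs =>
    (if prev = '_' ∧ c ≠ '\n' then PySem.Chars.upperChar c else c) :: pvRegexAux c cs

def pvRegexSub : List Char → List Char
  | [] => []
  | c :: cs => c :: pvRegexAux c cs

def convertRegionName_alt (name : String) : String :=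
  match name.toList with
  | [] => ""
  | c :: rest => String.ofList (PySem.Chars.upperChar c :: pvRegexSub (rest.map pvBMap))

-- ===== PRECONDITION & SPEC =====
def Spec_convertRegionName (name : String) (out : String) : Prop := out = convertRegionName_alt name
instance (name : String) (out : String) : Decidable (Spec_convertRegionName name out) := by unfold Spec_convertRegionName; infer_instance

-- ===== CLAIM (what is proved, stated in full; the proofs are below) =====
def Claim_equal_convertRegionName : Prop := ∀ (name : String), Dom_convertRegionName name → Spec_convertRegionName name (convertRegionName name)

-- ===== LEMMAS AND PROOFS =====

theorem pv_char_le_toNat (a b : Char) : (a ≤ b) ↔ (a.toNat ≤ b.toNat) := ge_iff_le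

theorem pv_upper_lower (c : Char) :
    PySem.Chars.upperChar (PySem.Chars.lowerChar c) = PySem.Chars.upperChar c := by
  simp only [PySem.Chars.lowerChar, PySem.Chars.upperChar, PySem.Chars.isupper, PySem.Chars.islower,
    Bool.and_eq_true, decide_eq_true_eq, pv_char_le_toNat]
  have ha : 'a'.toNat = 97 := rfl
  have hz : 'z'.toNat = 122 := rfl
  have hA : 'A'.toNat = 65 := rfl
  have hZ : 'Z'.toNat = 90 := rfl
  by_cases h : 'A'.toNat ≤ c.toNat ∧ c.toNat ≤ 'Z'.toNat
  · have hv : (Char.ofNat (c.toNat + 32)).toNat = c.toNat + 32 := by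
      rw [Char.toNat_ofNat]
      have : (c.toNat + 32).isValidChar := by left; omega
      simp [this]
    rw [if_pos h, if_pos (by rw [hv]; omega), if_neg (by omega), hv]
    have h32 : c.toNat + 32 - 32 = c.toNat := by omega
    rw [h32, Char.ofNat_toNat]
  · rw [if_neg h]

theorem pv_lower_ne_underscore {c : Char} (h : c ≠ '_') :
    PySem.Chars.lowerChar c ≠ '_' := by
  simp only [PySem.Chars.lowerChar, PySem.Chars.isupper, Bool.and_eq_true, decide_eq_true_eq,
    pv_char_le_toNat]
  have hA : 'A'.toNat = 65 := rfl
  have hZ : 'Z'.toNat = 90 := rfl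
  split_ifs with hc
  · intro he
    have : (Char.ofNat (c.toNat + 32)).toNat = c.toNat + 32 := by
      rw [Char.toNat_ofNat]
      have : (c.toNat + 32).isValidChar := by left; omega
      simp [this]
    have h95 : '_'.toNat = 95 := rfl
    have := congrArg Char.toNat he
    omega
  · exact h

theorem pv_lower_eq_newline {c : Char} (h : PySem.Chars.lowerChar c = '\n') : c = '\n' := by
  revert h
  simp only [PySem.Chars.lowerChar, PySem.Chars.isupper, Bool.and_eq_true, decide_eq_true_eq,
    pv_char_le_toNat]
  have hA : 'A'.toNat = 65 := rfl
  have hZ : 'Z'.toNat = 90 := rfl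
  split_ifs with hc
  · intro he
    have : (Char.ofNat (c.toNat + 32)).toNat = c.toNat + 32 := by
      rw [Char.toNat_ofNat]
      have : (c.toNat + 32).isValidChar := by left; omega
      simp [this]
    have h10 : '\n'.toNat = 10 := rfl
    have := congrArg Char.toNat he
    exfalso; omega
  · exact id

theorem pv_upper_underscore : PySem.Chars.upperChar '_' = '_' := by decide

theorem pv_upper_newline : PySem.Chars.upperChar '\n' = '\n' := by decide

-- A's loop body for the indices ≥ 1, as a plain recursion on the characters
def pvBody : List Char → Bool → List Char
  | [], _ => []
  | ch :: rest, u =>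
    if ch = ' ' ∨ ch = '_' then '_' :: pvBody rest true
    else (if u then PySem.Chars.upperChar ch else PySem.Chars.lowerChar ch) :: pvBody rest false

theorem pvAGo_enumerate (cs : List Char) :
    ∀ (s : Int), 1 ≤ s → ∀ (conv : List Char) (u : Bool),
      pvAGo (PySem.List.enumerate cs s) conv u = conv ++ pvBody cs u := by
  induction cs with
  | nil => intro s _ conv u; simp [PySem.List.enumerate_nil, pvAGo, pvBody]
  | cons c cs ih =>
    intro s hs conv u
    rw [PySem.List.enumerate_cons]
    by_cases hc : c = ' ' ∨ c = '_'
    · simp only [pvAGo, if_neg (by omega : ¬ (s = 0)), if_pos hc, pvBody]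
      rw [ih (s+1) (by omega)]
      simp
    · by_cases hu : u = true
      · subst hu
        simp only [pvAGo, if_neg (by omega : ¬ (s = 0)), if_neg hc, pvBody]
        rw [ih (s+1) (by omega)]
        simp
      · simp only [Bool.not_eq_true] at hu; subst hu
        simp only [pvAGo, if_neg (by omega : ¬ (s = 0)), if_neg hc, pvBody, if_neg (by simp : ¬ false = true)]
        rw [ih (s+1) (by omega)]
        simp

theorem pvBody_eq_regexAux (cs : List Char) :
    ∀ (u : Bool) (p : Char), (p = '_' ↔ u = true) →
      pvBody cs u = pvRegexAux p (cs.map pvBMap) := by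
  induction cs with
  | nil => intro u p _; simp [pvBody, pvRegexAux]
  | cons c cs ih =>
    intro u p hp
    by_cases hc : c = ' ' ∨ c = '_'
    · simp only [pvBody, List.map_cons, pvBMap, if_pos hc, pvRegexAux]
      rw [ih true '_' (by simp)]
      congr 1
      split_ifs <;> simp [pv_upper_underscore]
    · simp only [pvBody, List.map_cons, pvBMap, if_neg hc, pvRegexAux]
      have hne : c ≠ '_' := fun h => hc (Or.inr h)
      rw [ih false (PySem.Chars.lowerChar c) (by simp [pv_lower_ne_underscore hne])]
      congr 1
      by_cases hu : u = true
      · subst hu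
        rw [if_pos rfl, hp.mpr rfl]
        by_cases hn : PySem.Chars.lowerChar c = '\n'
        · rw [if_neg (by simp [hn]), hn, pv_lower_eq_newline hn, pv_upper_newline]
        · rw [if_pos ⟨rfl, hn⟩, pv_upper_lower]
      · simp only [Bool.not_eq_true] at hu; subst hu
        rw [if_neg (by simp), if_neg (fun h => by simpa using hp.mp h.1)]

theorem pvBody_eq_regexSub (cs : List Char) :
    pvBody cs false = pvRegexSub (cs.map pvBMap) := by
  cases cs with
  | nil => simp [pvBody, pvRegexSub]
  | cons c cs =>
    by_cases hc : c = ' ' ∨ c = '_'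
    · simp only [pvBody, List.map_cons, pvBMap, if_pos hc, pvRegexSub,
        if_neg (by simp : ¬ false = true)]
      exact congrArg _ (pvBody_eq_regexAux cs true '_' (by simp))
    · simp only [pvBody, List.map_cons, pvBMap, if_neg hc, pvRegexSub,
        if_neg (by simp : ¬ false = true)]
      have hne : c ≠ '_' := fun h => hc (Or.inr h)
      exact congrArg _
        (pvBody_eq_regexAux cs false (PySem.Chars.lowerChar c)
          (by simp [pv_lower_ne_underscore hne]))

-- ===== VERDICT (by name: the statement is the Claim_ definition above) =====
theorem convertRegionName_spec : Claim_equal_convertRegionName := by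
  intro name _
  unfold Spec_convertRegionName convertRegionName convertRegionName_alt
  cases h : name.toList with
  | nil => rfl
  | cons c rest =>
    simp only [PySem.List.enumerate_cons, pvAGo,
      List.nil_append, zero_add]
    rw [pvAGo_enumerate rest 1 (by omega) [PySem.Chars.upperChar c] false,
      pvBody_eq_regexSub]
    simp
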